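-- pv_equiv track=rewrite | github.com/Revi1337/BaekJoon-Coding-Test | 백준/Silver/2578. 빙고/빙고.py | solution
-- ===== SOURCE A (Python) =====
-- def solution(board, questions):
--     counter = 0
--     for question in questions:
--         for q in question:
--             for row in range(5):
--                 for col in range(5):
--                     if board[row][col] == q:
--                         counter += 1
--                         board[row][col] = 0
--
--             answer = 0
--             for line in board:
--                 if sum(line) == 0:
--                     answer += 1
--                     if answer == 3:
--                         return counter
--
--             for col in range(5):
--                 if sum([line[col] for line in board]) == 0:
--                     answer += 1
--                     if answer == 3:
--                         return counter
--
--             if sum([board[row][5 - row - 1] for row in range(5)]) == 0: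
--                 answer += 1
--                 if answer == 3:
--                     return counter
--
--             if sum([board[row][row] for row in range(5)]) == 0:
--                 answer += 1
--                 if answer == 3:
--                     return counter
-- ===== SOURCE B (Python) =====
-- def solution(board, questions):
--     # Incremental line-sum bookkeeping: precompute the sum of every bingo line
--     # once, update the affected sums when a cell is marked, and count zero-sum
--     # lines arithmetically instead of rescanning the board after every number.
--     nums = [q for question in questions for q in question]
--     if not nums:
--         return None
--     row_sums = [sum(r) for r in board]
--     col_sums = [sum(r[c] for r in board) for c in range(5)]
--     anti = sum(board[r][5 - r - 1] for r in range(5))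
--     main = sum(board[r][r] for r in range(5))
--     counter = 0
--     for q in nums:
--         for r in range(5):
--             for c in range(5):
--                 if board[r][c] == q:
--                     counter += 1
--                     board[r][c] = 0
--                     row_sums[r] -= q
--                     col_sums[c] -= q
--                     if r + c == 4:
--                         anti -= q
--                     if r == c:
--                         main -= q
--         lines = row_sums + col_sums + [anti, main]
--         if lines.count(0) >= 3:
--             return counter
--     return None
-- ===== Notes on version B (the rewrite author's own statement) =====
-- stated objective: alternative
-- what changed: B precomputes the sum of every bingo line (rows, columns, both diagonals) once and updates only the affected sums when a cell is marked, counting zero-sum lines arithmetically, instead of A's re-summing of every line of the board after each queried number.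
import Mathlib
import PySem

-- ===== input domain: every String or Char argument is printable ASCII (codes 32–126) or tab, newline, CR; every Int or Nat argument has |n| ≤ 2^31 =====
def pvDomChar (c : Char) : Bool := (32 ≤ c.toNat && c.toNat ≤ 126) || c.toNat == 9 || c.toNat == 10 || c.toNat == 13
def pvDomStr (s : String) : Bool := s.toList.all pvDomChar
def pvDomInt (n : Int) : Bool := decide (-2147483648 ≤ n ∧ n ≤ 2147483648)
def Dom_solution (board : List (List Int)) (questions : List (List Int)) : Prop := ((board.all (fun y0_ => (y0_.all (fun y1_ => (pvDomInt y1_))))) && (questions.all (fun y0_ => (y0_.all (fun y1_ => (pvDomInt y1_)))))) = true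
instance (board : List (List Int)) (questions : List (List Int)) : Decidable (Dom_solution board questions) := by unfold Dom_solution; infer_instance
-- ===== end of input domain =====

set_option maxRecDepth 8192
set_option maxHeartbeats 1600000

-- B replaces A's per-move re-summing of every bingo line by line sums maintained
-- incrementally (objective: alternative bookkeeping strategy). Both programs mutate
-- `board` in place in Python; the equivalence proved here is about the RETURN value only.

-- ===== PORT A =====
-- one cell of A's marking scan: `if board[row][col] == q: counter += 1; board[row][col] = 0`
def pvA_markStep (q : Int) (st : List (List Int) × Int) (row col : Int) : List (List Int) × Int :=
  let rw := PySem.List.pyGetD st.1 row []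
  if PySem.List.pyGetD rw col 0 == q then
    (PySem.List.pySetD st.1 row (PySem.List.pySetD rw col 0), st.2 + 1)
  else st

-- `for row in range(5): for col in range(5): …`
def pvA_mark (q : Int) (st : List (List Int) × Int) : List (List Int) × Int :=
  (PySem.List.pyRange 0 5 1).foldl (fun st row =>
    (PySem.List.pyRange 0 5 1).foldl (fun st col => pvA_markStep q st row col) st) st

-- the line sums A tests, in A's order: every row of board, the five columns, anti-diagonal, main diagonal
def pvA_sums (b : List (List Int)) : List Int :=
  b.map List.sum
  ++ (PySem.List.pyRange 0 5 1).map (fun col => (b.map (fun line => PySem.List.pyGetD line col 0)).sum)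
  ++ [((PySem.List.pyRange 0 5 1).map (fun row => PySem.List.pyGetD (PySem.List.pyGetD b row []) (5 - row - 1) 0)).sum,
      ((PySem.List.pyRange 0 5 1).map (fun row => PySem.List.pyGetD (PySem.List.pyGetD b row []) row 0)).sum]

-- A's four early-return loops: `answer += 1` on each zero sum, `return counter` when answer hits 3
def pvA_scan (sums : List Int) (answer counter : Int) : Option Int :=
  match sums with
  | [] => none
  | s :: rest =>
    if s == 0 then
      (if answer + 1 == 3 then some counter else pvA_scan rest (answer + 1) counter)
    else pvA_scan rest answer counter

-- A's early-return scan over the line sums of the current board (Except.error r =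
-- `return counter` fired)
def pvA_try (p : List (List Int) × Int) : Except Int (List (List Int) × Int) :=
  match pvA_scan (pvA_sums p.1) 0 p.2 with
  | some r => .error r
  | none => .ok p

-- one queried number q: mark the board, then scan; an earlier return is propagated
def pvA_qstep (st : Except Int (List (List Int) × Int)) (q : Int) :
    Except Int (List (List Int) × Int) :=
  match st with
  | .error r => .error r
  | .ok p => pvA_try (pvA_mark q p)

-- `for question in questions: for q in question: …`; falling off the end is Python's implicit None
def solution (board : List (List Int)) (questions : List (List Int)) : Option Int :=
  match questions.foldl (fun st question => question.foldl pvA_qstep st) (.ok (board, 0)) with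
  | .error r => some r
  | .ok _ => none

-- ===== PORT B =====
-- B's state: the board plus the incrementally maintained line sums
structure pvBSt where
  board : List (List Int)
  counter : Int
  rows : List Int
  cols : List Int
  anti : Int
  main : Int
deriving Repr, DecidableEq

-- row_sums = [sum(r) for r in board]
def pvB_rowSums (b : List (List Int)) : List Int := b.map List.sum
-- col_sums = [sum(r[c] for r in board) for c in range(5)]
def pvB_colSums (b : List (List Int)) : List Int :=
  (PySem.List.pyRange 0 5 1).map (fun c => (b.map (fun r => PySem.List.pyGetD r c 0)).sum)
-- anti = sum(board[r][5 - r - 1] for r in range(5))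
def pvB_anti (b : List (List Int)) : Int :=
  ((PySem.List.pyRange 0 5 1).map (fun r => PySem.List.pyGetD (PySem.List.pyGetD b r []) (5 - r - 1) 0)).sum
-- main = sum(board[r][r] for r in range(5))
def pvB_main (b : List (List Int)) : Int :=
  ((PySem.List.pyRange 0 5 1).map (fun r => PySem.List.pyGetD (PySem.List.pyGetD b r []) r 0)).sum

-- one cell of B's marking scan: mark and update the affected line sums
def pvB_markStep (q : Int) (s : pvBSt) (row col : Int) : pvBSt :=
  let rw := PySem.List.pyGetD s.board row []
  if PySem.List.pyGetD rw col 0 == q then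
    { board := PySem.List.pySetD s.board row (PySem.List.pySetD rw col 0),
      counter := s.counter + 1,
      rows := PySem.List.pySetD s.rows row (PySem.List.pyGetD s.rows row 0 - q),
      cols := PySem.List.pySetD s.cols col (PySem.List.pyGetD s.cols col 0 - q),
      anti := if row + col == 4 then s.anti - q else s.anti,
      main := if row == col then s.main - q else s.main }
  else s

def pvB_mark (q : Int) (s : pvBSt) : pvBSt :=
  (PySem.List.pyRange 0 5 1).foldl (fun s row =>
    (PySem.List.pyRange 0 5 1).foldl (fun s col => pvB_markStep q s row col) s) s

-- one queried number: mark + update sums, early `return counter` once 3 lines are complete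
def pvB_qstep (st : Except Int pvBSt) (q : Int) : Except Int pvBSt :=
  match st with
  | .error r => .error r
  | .ok s =>
    let s' := pvB_mark q s
    if 3 ≤ PySem.List.count (s'.rows ++ s'.cols ++ [s'.anti, s'.main]) 0 then .error s'.counter
    else .ok s'

def solution_alt (board : List (List Int)) (questions : List (List Int)) : Option Int :=
  let nums := questions.flatMap id
  if nums.isEmpty then none
  else
    match nums.foldl pvB_qstep
        (.ok ⟨board, 0, pvB_rowSums board, pvB_colSums board, pvB_anti board, pvB_main board⟩) with
    | .error r => some r
    | .ok _ => none

-- ===== PRECONDITION & SPEC =====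
-- Pre_ admits exactly: no number is queried at all (A touches nothing and returns None), or the
-- board has at least 5 rows each of length at least 5 (A's indexing never raises). It excludes
-- boards with a short row beyond the first five on which A can still return by reaching three
-- bingo lines before its column scan hits the short row; B's upfront column-sum precomputation
-- raises IndexError there.
def Pre_solution (board : List (List Int)) (questions : List (List Int)) : Prop :=
  questions.flatMap id = [] ∨ (5 ≤ board.length ∧ ∀ r ∈ board, 5 ≤ r.length)
instance (board : List (List Int)) (questions : List (List Int)) : Decidable (Pre_solution board questions) := by unfold Pre_solution; infer_instance

def pvWitness_solution : List (List Int) × List (List Int) :=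
  ([[1,2,3,4,5],[6,7,8,9,10],[11,12,13,14,15],[16,17,18,19,20],[21,22,23,24,25]], [[1,2],[3]])

def Spec_solution (board : List (List Int)) (questions : List (List Int)) (out : Option Int) : Prop := out = solution_alt board questions
instance (board : List (List Int)) (questions : List (List Int)) (out : Option Int) : Decidable (Spec_solution board questions out) := by unfold Spec_solution; infer_instance

-- ===== CLAIM (what is proved, stated in full; the proofs are below) =====
def Claim_equal_solution : Prop := ∀ (board : List (List Int)) (questions : List (List Int)), Dom_solution board questions → Pre_solution board questions → Spec_solution board questions (solution board questions)

-- ===== LEMMAS AND PROOFS =====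

-- shape invariant carried through the marking loop
def pvShp (b : List (List Int)) : Prop := 5 ≤ b.length ∧ ∀ r ∈ b, 5 ≤ r.length

-- coherence: B's state is A's board and counter together with the true line sums
def pvCoh (p : List (List Int) × Int) (s : pvBSt) : Prop :=
  s.board = p.1 ∧ s.counter = p.2 ∧ s.rows = pvB_rowSums p.1 ∧ s.cols = pvB_colSums p.1 ∧
  s.anti = pvB_anti p.1 ∧ s.main = pvB_main p.1 ∧ pvShp p.1

lemma pvFoldRel {α β γ : Type} (R : α → β → Prop) (f : α → γ → α) (g : β → γ → β) :
    ∀ (l : List γ), (∀ a b i, i ∈ l → R a b → R (f a i) (g b i)) →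
    ∀ a b, R a b → R (l.foldl f a) (l.foldl g b) := by
  intro l
  induction l with
  | nil => intro _ a b h; exact h
  | cons x xs ih =>
    intro hstep a b h
    exact ih (fun a b i hi => hstep a b i (List.mem_cons_of_mem _ hi)) _ _
      (hstep a b x (List.mem_cons_self ..) h)

lemma pvSumSet (l : List Int) (i : Nat) (x : Int) (h : i < l.length) :
    (l.set i x).sum = l.sum - l[i] + x := by
  induction l generalizing i with
  | nil => simp at h
  | cons a t ih =>
    cases i with
    | zero => simp; ring
    | succ j =>
      have hj : j < t.length := by simpa using h
      simp [List.sum_cons, ih j hj]; ring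

lemma pvGetD_set {α : Type} (l : List α) (i j : Nat) (x d : α) :
    (l.set i x).getD j d = if i = j ∧ j < l.length then x else l.getD j d := by
  rcases Nat.lt_or_ge j l.length with hj | hj
  · rw [List.getD_eq_getElem _ _ (by simpa using hj), List.getElem_set]
    split_ifs with h1 h2 h2 <;> simp_all
  · have h1 : (l.set i x).getD j d = d := by
      apply List.getD_eq_default; simpa using hj
    have h2 : l.getD j d = d := List.getD_eq_default _ _ hj
    rw [h1, h2, if_neg]; omega

-- change of one column sum when cell (rn, cn) of the board is zeroed
lemma pvColSum1 (b : List (List Int)) (rn cn c : Nat) (hrn : rn < b.length)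
    (hcn : cn < b[rn].length) (hc : c < b[rn].length) :
    ((b.set rn (b[rn].set cn 0)).map (fun r => PySem.List.pyGetD r (c : Int) 0)).sum
      = (b.map (fun r => PySem.List.pyGetD r (c : Int) 0)).sum
        - (if cn = c then b[rn][cn] else 0) := by
  have h2 : PySem.List.pyGetD b[rn] (c : Int) 0 = b[rn][c] := by
    rw [PySem.List.pyGetD_natCast, List.getD_eq_getElem _ _ hc]
  have h3 : PySem.List.pyGetD (b[rn].set cn 0) (c : Int) 0 = if cn = c then 0 else b[rn][c] := by
    rw [PySem.List.pyGetD_natCast, pvGetD_set]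
    by_cases hcc : cn = c
    · rw [if_pos ⟨hcc, by omega⟩, if_pos hcc]
    · rw [if_neg (fun hh => hcc hh.1), if_neg hcc, List.getD_eq_getElem _ _ hc]
  rw [List.map_set, pvSumSet _ rn _ (by simpa using hrn)]
  have h1 : (b.map (fun r => PySem.List.pyGetD r (c : Int) 0))[rn]'(by simpa using hrn)
      = PySem.List.pyGetD b[rn] (c : Int) 0 := by simp
  rw [h1, h2, h3]
  by_cases hcc : cn = c
  · subst hcc; simp
  · simp [hcc]

-- a sum over range(5) of per-row terms, after row rn is replaced
lemma pvDiagSum (F : Int → List Int → Int) (b : List (List Int)) (x : List Int) (rn : Nat)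
    (hrn5 : rn < 5) (hrn : rn < b.length) :
    ((PySem.List.pyRange 0 5 1).map (fun r => F r (PySem.List.pyGetD (b.set rn x) r []))).sum
      = ((PySem.List.pyRange 0 5 1).map (fun r => F r (PySem.List.pyGetD b r []))).sum
        - F rn b[rn] + F rn x := by
  have hsplit : PySem.List.pyRange 0 5 1
      = PySem.List.pyRange 0 (rn : Int) 1 ++ (rn : Int) :: PySem.List.pyRange ((rn : Int) + 1) 5 1 := by
    rw [PySem.List.pyRange_one_append 0 (rn : Int) 5 (by positivity) (by exact_mod_cast hrn5.le),
        PySem.List.pyRange_one_cons (a := (rn : Int)) (b := 5) (by exact_mod_cast hrn5)]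
  have hside : ∀ r : Int, r ≠ (rn : Int) → 0 ≤ r →
      PySem.List.pyGetD (b.set rn x) r [] = PySem.List.pyGetD b r [] := by
    intro r hne h0
    obtain ⟨m, rfl⟩ := Int.eq_ofNat_of_zero_le h0
    simp only [PySem.List.pyGetD_natCast, pvGetD_set]
    rw [if_neg (by intro hh; exact hne (by exact_mod_cast hh.1.symm))]
  have hmid : PySem.List.pyGetD (b.set rn x) (rn : Int) [] = x := by
    rw [PySem.List.pyGetD_natCast, pvGetD_set, if_pos ⟨rfl, hrn⟩]
  have hmid2 : PySem.List.pyGetD b (rn : Int) [] = b[rn] := by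
    rw [PySem.List.pyGetD_natCast, List.getD_eq_getElem _ _ hrn]
  have hL : ∀ r ∈ PySem.List.pyRange 0 (rn : Int) 1,
      F r (PySem.List.pyGetD (b.set rn x) r []) = F r (PySem.List.pyGetD b r []) := by
    intro r hr
    obtain ⟨h0, h1⟩ := PySem.List.mem_pyRange_one.mp hr
    rw [hside r (by omega) h0]
  have hR : ∀ r ∈ PySem.List.pyRange ((rn : Int) + 1) 5 1,
      F r (PySem.List.pyGetD (b.set rn x) r []) = F r (PySem.List.pyGetD b r []) := by
    intro r hr
    obtain ⟨h0, h1⟩ := PySem.List.mem_pyRange_one.mp hr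
    rw [hside r (by omega) (by omega)]
  rw [hsplit]
  simp only [List.map_append, List.map_cons, List.sum_append, List.sum_cons,
    List.map_congr_left hL, List.map_congr_left hR, hmid, hmid2]
  ring

-- the early-return scan returns `some counter` exactly when the zero-sum lines reach three
lemma pvScan_eq (sums : List Int) : ∀ (a cnt : Int), a < 3 →
    pvA_scan sums a cnt = if 3 ≤ a + (PySem.List.count sums 0 : Int) then some cnt else none := by
  induction sums with
  | nil =>
    intro a cnt ha
    simp only [pvA_scan, PySem.List.count_eq, List.count_nil]
    rw [if_neg (by push_cast; omega)]
  | cons s rest ih =>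
    intro a cnt ha
    have ih' := fun (a cnt : Int) (h : a < 3) => ih a cnt h
    simp only [PySem.List.count_eq] at ih' ⊢
    simp only [pvA_scan, List.count_cons]
    by_cases hs : s = 0
    · subst hs
      simp only [beq_self_eq_true, if_true]
      by_cases h3 : a + 1 = 3
      · rw [if_pos (by simp [h3]), if_pos (by push_cast; omega)]
      · rw [if_neg (by simp [h3]), ih' (a + 1) cnt (by omega)]
        by_cases hcond : 3 ≤ a + 1 + (List.count 0 rest : Int)
        · rw [if_pos hcond, if_pos (by push_cast; omega)]
        · rw [if_neg hcond, if_neg (by push_cast; omega)]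
    · have h0 : (s == 0) = false := by simp [hs]
      simp only [h0, Bool.false_eq_true, if_false, Nat.add_zero]
      exact ih' a cnt ha

-- one marking step preserves coherence
lemma pvStep (q row col : Int) (hr : row ∈ PySem.List.pyRange 0 5 1)
    (hc : col ∈ PySem.List.pyRange 0 5 1) (p : List (List Int) × Int) (s : pvBSt)
    (h : pvCoh p s) : pvCoh (pvA_markStep q p row col) (pvB_markStep q s row col) := by
  obtain ⟨hr0, hr5⟩ := PySem.List.mem_pyRange_one.mp hr
  obtain ⟨hc0, hc5⟩ := PySem.List.mem_pyRange_one.mp hc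
  obtain ⟨rn, rfl⟩ := Int.eq_ofNat_of_zero_le hr0
  obtain ⟨cn, rfl⟩ := Int.eq_ofNat_of_zero_le hc0
  have hrn5 : rn < 5 := by exact_mod_cast hr5
  have hcn5 : cn < 5 := by exact_mod_cast hc5
  obtain ⟨b, cnt⟩ := p
  obtain ⟨hbd, hcnt, hrows, hcols, hanti, hmain, hlen, hrowlen⟩ := h
  dsimp only at hbd hcnt hrows hcols hanti hmain hlen hrowlen
  have hrn : rn < b.length := by omega
  have hrwlen : 5 ≤ b[rn].length := hrowlen _ (List.getElem_mem hrn)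
  have hcn : cn < b[rn].length := by omega
  have hget : PySem.List.pyGetD b (rn : Int) [] = b[rn] := by
    rw [PySem.List.pyGetD_natCast, List.getD_eq_getElem _ _ hrn]
  have hvv : PySem.List.pyGetD b[rn] (cn : Int) 0 = b[rn][cn] := by
    rw [PySem.List.pyGetD_natCast, List.getD_eq_getElem _ _ hcn]
  unfold pvA_markStep pvB_markStep
  simp only [hbd, hcnt, hrows, hcols, hanti, hmain, hget]
  by_cases hq : b[rn][cn] = q
  · have hcond : (PySem.List.pyGetD b[rn] (cn : Int) 0 == q) = true := by
      rw [hvv, hq]; exact beq_self_eq_true q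
    rw [if_pos hcond, if_pos hcond]
    set b2 := PySem.List.pySetD b (rn : Int) (PySem.List.pySetD b[rn] (cn : Int) 0) with hb2
    have hb2' : b2 = b.set rn (b[rn].set cn 0) := by
      simp [hb2]
    refine ⟨rfl, rfl, ?_, ?_, ?_, ?_, ?_⟩
    · -- rows
      show PySem.List.pySetD (pvB_rowSums b) (rn : Int) (PySem.List.pyGetD (pvB_rowSums b) (rn : Int) 0 - q)
          = pvB_rowSums b2
      have hlenmap : rn < (b.map List.sum).length := by simpa using hrn
      rw [hb2']
      unfold pvB_rowSums
      rw [List.map_set, PySem.List.pySetD_natCast, PySem.List.pyGetD_natCast,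
        List.getD_eq_getElem _ _ hlenmap]
      congr 1
      rw [pvSumSet _ cn _ hcn]
      simp [hq]
    · -- cols
      show PySem.List.pySetD (pvB_colSums b) (cn : Int) (PySem.List.pyGetD (pvB_colSums b) (cn : Int) 0 - q)
          = pvB_colSums b2
      rw [hb2', PySem.List.pySetD_natCast, PySem.List.pyGetD_natCast]
      have hlen5 : ∀ (bb : List (List Int)), (pvB_colSums bb).length = 5 := by
        intro bb; simp [pvB_colSums, PySem.List.length_pyRange_one]
      have hibr : ∀ (bb : List (List Int)) (j : Nat) (hj : j < 5),
          (pvB_colSums bb)[j]'(by rw [hlen5]; omega)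
          = (bb.map (fun r => PySem.List.pyGetD r (j : Int) 0)).sum := by
        intro bb j hj
        have hrange : j < (PySem.List.pyRange 0 5 1).length := by
          simp [PySem.List.length_pyRange_one]; omega
        simp only [pvB_colSums, List.getElem_map,
          PySem.List.getElem_pyRange_one _ _ _ hrange]
        norm_num
      have hgd : (pvB_colSums b).getD cn 0
          = (b.map (fun r => PySem.List.pyGetD r (cn : Int) 0)).sum := by
        rw [List.getD_eq_getElem _ _ (by rw [hlen5]; omega), hibr b cn hcn5]
      apply List.ext_getElem (by simp [hlen5, List.length_set])
      intro k hk1 hk2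
      have hk5 : k < 5 := by rw [List.length_set, hlen5] at hk1; omega
      have hkb : k < b[rn].length := by omega
      simp only [List.getElem_set, hibr (b.set rn (b[rn].set cn 0)) k hk5,
        hibr b k hk5, hgd, pvColSum1 b rn cn k hrn hcn hkb]
      by_cases hck : cn = k
      · subst hck; simp [hq]
      · simp [hck]
    · -- anti
      show (if (rn : Int) + (cn : Int) == 4 then pvB_anti b - q else pvB_anti b) = pvB_anti b2
      rw [hb2']
      unfold pvB_anti
      rw [pvDiagSum (fun r row => PySem.List.pyGetD row (5 - r - 1) 0) b _ rn hrn5 hrn]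
      have hidx : (5 - (rn : Int) - 1) = ((4 - rn : Nat) : Int) := by omega
      have hold : PySem.List.pyGetD b[rn] (5 - (rn : Int) - 1) 0 = b[rn][4 - rn] := by
        rw [hidx, PySem.List.pyGetD_natCast, List.getD_eq_getElem _ _ (by omega)]
      have hnew : PySem.List.pyGetD (b[rn].set cn 0) (5 - (rn : Int) - 1) 0
          = if cn = 4 - rn then 0 else b[rn][4 - rn] := by
        rw [hidx, PySem.List.pyGetD_natCast, pvGetD_set]
        by_cases hdd : cn = 4 - rn
        · rw [if_pos ⟨hdd, by omega⟩, if_pos hdd]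
        · rw [if_neg (fun hh => hdd hh.1), if_neg hdd,
            List.getD_eq_getElem _ _ (by omega : 4 - rn < b[rn].length)]
      have hcondeq : (((rn : Int) + (cn : Int) == 4) = true) ↔ cn = 4 - rn := by
        simp only [beq_iff_eq]; omega
      rw [hold, hnew]
      by_cases hdd : cn = 4 - rn
      · have hv2 : b[rn][4 - rn] = q := by subst hdd; exact hq
        rw [if_pos (hcondeq.mpr hdd), if_pos hdd, hv2]; ring
      · rw [if_neg (fun hh => hdd (hcondeq.mp hh)), if_neg hdd]; ring
    · -- main
      show (if (rn : Int) == (cn : Int) then pvB_main b - q else pvB_main b) = pvB_main b2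
      rw [hb2']
      unfold pvB_main
      rw [pvDiagSum (fun r row => PySem.List.pyGetD row r 0) b _ rn hrn5 hrn]
      have hold : PySem.List.pyGetD b[rn] (rn : Int) 0 = b[rn][rn] := by
        rw [PySem.List.pyGetD_natCast, List.getD_eq_getElem _ _ (by omega)]
      have hnew : PySem.List.pyGetD (b[rn].set cn 0) (rn : Int) 0
          = if cn = rn then 0 else b[rn][rn] := by
        rw [PySem.List.pyGetD_natCast, pvGetD_set]
        by_cases hdd : cn = rn
        · rw [if_pos ⟨hdd, by omega⟩, if_pos hdd]
        · rw [if_neg (fun hh => hdd hh.1), if_neg hdd,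
            List.getD_eq_getElem _ _ (by omega : rn < b[rn].length)]
      have hcondeq : (((rn : Int) == (cn : Int)) = true) ↔ cn = rn := by
        simp only [beq_iff_eq]; omega
      rw [hold, hnew]
      by_cases hdd : cn = rn
      · have hv2 : b[rn][rn] = q := by subst hdd; exact hq
        rw [if_pos (hcondeq.mpr hdd), if_pos hdd, hv2]; ring
      · rw [if_neg (fun hh => hdd (hcondeq.mp hh)), if_neg hdd]; ring
    · -- shape preserved
      rw [hb2']
      refine ⟨by simpa using hlen, ?_⟩
      intro r hrmem
      rcases List.mem_or_eq_of_mem_set hrmem with hmem | rfl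
      · exact hrowlen r hmem
      · simpa using hrwlen
  · rw [if_neg (by rw [hvv]; simp [hq]), if_neg (by rw [hvv]; simp [hq])]
    exact ⟨hbd, hcnt, hrows, hcols, hanti, hmain, hlen, hrowlen⟩

lemma pvMark_coh (q : Int) (p : List (List Int) × Int) (s : pvBSt) (h : pvCoh p s) :
    pvCoh (pvA_mark q p) (pvB_mark q s) := by
  unfold pvA_mark pvB_mark
  refine pvFoldRel pvCoh _ _ _ ?_ _ _ h
  intro a b row hrow hab
  refine pvFoldRel pvCoh _ _ _ ?_ _ _ hab
  intro a b col hcol hab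
  exact pvStep q row col hrow hcol a b hab

lemma pvSums_eq (b : List (List Int)) :
    pvA_sums b = pvB_rowSums b ++ pvB_colSums b ++ [pvB_anti b, pvB_main b] := rfl

-- relation between the two Except states: same early return, or coherent running states
def pvRE (a : Except Int (List (List Int) × Int)) (bst : Except Int pvBSt) : Prop :=
  match a, bst with
  | .error r, .error r' => r = r'
  | .ok p, .ok s => pvCoh p s
  | _, _ => False

lemma pvA_try_eq (p : List (List Int) × Int) :
    pvA_try p = if 3 ≤ (PySem.List.count (pvA_sums p.1) 0 : Int) then .error p.2 else .ok p := by
  unfold pvA_try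
  rw [pvScan_eq (pvA_sums p.1) 0 p.2 (by omega)]
  by_cases h3 : 3 ≤ (0 : Int) + (PySem.List.count (pvA_sums p.1) 0 : Int)
  · rw [if_pos h3, if_pos (by omega)]
  · rw [if_neg h3, if_neg (by omega)]

lemma pvQstep_rel (q : Int) (a : Except Int (List (List Int) × Int)) (bst : Except Int pvBSt)
    (h : pvRE a bst) : pvRE (pvA_qstep a q) (pvB_qstep bst q) := by
  cases a with
  | error r =>
    cases bst with
    | error r' => exact h
    | ok s => simp only [pvRE] at h
  | ok p =>
    cases bst with
    | error r' => simp only [pvRE] at h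
    | ok s =>
      have h' : pvCoh p s := h
      have hm := pvMark_coh q p s h'
      have hbd := hm.1
      have hcnt := hm.2.1
      have hrows := hm.2.2.1
      have hcols := hm.2.2.2.1
      have hanti := hm.2.2.2.2.1
      have hmain := hm.2.2.2.2.2.1
      have hsums : pvA_sums (pvA_mark q p).1
          = (pvB_mark q s).rows ++ (pvB_mark q s).cols
            ++ [(pvB_mark q s).anti, (pvB_mark q s).main] := by
        rw [pvSums_eq, ← hrows, ← hcols, ← hanti, ← hmain]
      simp only [pvA_qstep, pvB_qstep]
      rw [pvA_try_eq, hsums]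
      generalize hP : pvA_mark q p = P at hm hcnt ⊢
      generalize hS : pvB_mark q s = S at hm hcnt ⊢
      by_cases h3 : 3 ≤ (PySem.List.count (S.rows ++ S.cols ++ [S.anti, S.main]) 0 : Int)
      · rw [if_pos h3, if_pos (by exact_mod_cast h3)]
        exact hcnt.symm
      · rw [if_neg h3, if_neg (by intro hh; exact h3 (by exact_mod_cast hh))]
        exact hm

-- A's nested loops over `questions` are its loop over the flattened number list
lemma pvFlatten (questions : List (List Int)) :
    ∀ (init : Except Int (List (List Int) × Int)),
    (questions.flatMap id).foldl pvA_qstep init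
      = questions.foldl (fun st question => question.foldl pvA_qstep st) init := by
  induction questions with
  | nil => intro init; simp
  | cons question rest ih =>
    intro init
    simp only [List.flatMap_cons, id_eq, List.foldl_append, List.foldl_cons, ih]

-- ===== VERDICT (by name: the statement is the Claim_ definition above) =====
theorem solution_spec : Claim_equal_solution := by
  intro board questions _ hpre
  unfold Spec_solution solution solution_alt
  simp only []
  rw [← pvFlatten]
  by_cases hnil : questions.flatMap id = []
  · rw [hnil]
    simp
  · have hshape : 5 ≤ board.length ∧ ∀ r ∈ board, 5 ≤ r.length := by
      rcases hpre with h | h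
      · exact absurd h hnil
      · exact h
    rw [if_neg (by simpa using hnil)]
    have hrel := pvFoldRel pvRE pvA_qstep pvB_qstep (questions.flatMap id)
      (fun a b i _ h => pvQstep_rel i a b h) (.ok (board, 0))
      (.ok ⟨board, 0, pvB_rowSums board, pvB_colSums board, pvB_anti board, pvB_main board⟩)
      ⟨rfl, rfl, rfl, rfl, rfl, rfl, hshape⟩
    revert hrel
    cases (questions.flatMap id).foldl pvA_qstep (.ok (board, 0)) with
    | error r =>
      cases (questions.flatMap id).foldl pvB_qstep
          (.ok ⟨board, 0, pvB_rowSums board, pvB_colSums board, pvB_anti board, pvB_main board⟩) with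
      | error r' => intro hrel; have hr : r = r' := hrel; rw [hr]
      | ok s => intro hrel; simp only [pvRE] at hrel
    | ok p =>
      cases (questions.flatMap id).foldl pvB_qstep
          (.ok ⟨board, 0, pvB_rowSums board, pvB_colSums board, pvB_anti board, pvB_main board⟩) with
      | error r' => intro hrel; simp only [pvRE] at hrel
      | ok s => intro _; rfl
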